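-- pv_equiv track=rewrite | github.com/epilectrik/voynich | phases/LANE_OSCILLATION_CONTROL_LAW/scripts/t4_section_parameterization.py | compute_run_lengths
-- ===== SOURCE A (Python) =====
-- def compute_run_lengths(sequences, lane):
--     """Compute run-length distribution for a specific lane across all sequences.
--
--     A run = consecutive tokens in the same lane within a single sequence (line).
--     """
--     runs = []
--     for seq in sequences:
--         current_run = 0
--         for token in seq:
--             if token == lane:
--                 current_run += 1
--             else:
--                 if current_run > 0:
--                     runs.append(current_run)
--                 current_run = 0
--         if current_run > 0:
--             runs.append(current_run)
--     return runs
-- ===== SOURCE B (Python) =====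
-- def compute_run_lengths(sequences, lane):
--     """Partition each sequence into maximal runs by scanning with two indices,
--     keeping the length of each run whose token equals lane."""
--     runs = []
--     for seq in sequences:
--         i, n = 0, len(seq)
--         while i < n:
--             j = i + 1
--             while j < n and seq[j] == seq[i]:
--                 j += 1
--             if seq[i] == lane:
--                 runs.append(j - i)
--             i = j
--     return runs
-- ===== Notes on version B (the rewrite author's own statement) =====
-- stated objective: alternative
-- what changed: B partitions every sequence into maximal runs with a forward two-index scan (find the end of each run, emit its length if its token is the lane) instead of A's running counter that increments on match and flushes on mismatch and at end of sequence.
import Mathlib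
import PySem

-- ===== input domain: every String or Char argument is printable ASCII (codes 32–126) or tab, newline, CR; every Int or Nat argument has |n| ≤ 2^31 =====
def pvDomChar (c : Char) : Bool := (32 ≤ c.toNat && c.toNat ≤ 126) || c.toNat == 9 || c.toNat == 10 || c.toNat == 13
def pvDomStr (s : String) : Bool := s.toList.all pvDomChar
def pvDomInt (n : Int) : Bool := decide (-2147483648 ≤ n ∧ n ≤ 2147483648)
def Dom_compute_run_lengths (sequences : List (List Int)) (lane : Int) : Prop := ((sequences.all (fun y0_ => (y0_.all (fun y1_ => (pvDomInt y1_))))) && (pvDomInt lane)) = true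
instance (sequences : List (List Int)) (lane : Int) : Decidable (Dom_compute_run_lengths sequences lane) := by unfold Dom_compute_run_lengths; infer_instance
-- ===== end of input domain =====

-- B replaces A's running counter (increment on match, flush on mismatch / at end)
-- by a forward two-index scan that partitions each sequence into maximal runs and
-- keeps the lengths of the runs whose token equals lane; same cost, different structure.

-- ===== PORT A =====
def compute_run_lengths (sequences : List (List Int)) (lane : Int) : List Int :=
  sequences.foldl (fun runs seq =>
    let p := seq.foldl (fun (p : List Int × Int) token =>
      if token = lane then (p.1, p.2 + 1)
      else (if p.2 > 0 then p.1 ++ [p.2] else p.1, 0)) (runs, 0)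
    if p.2 > 0 then p.1 ++ [p.2] else p.1) []

-- ===== PORT B =====
-- runsOfSeq mirrors Source B's inner while loops: the takeWhile scan is the inner
-- 'while j < n and seq[j] == seq[i]' advance, dropWhile jumps i to j.
def runsOfSeq (lane : Int) : List Int → List Int
  | [] => []
  | x :: xs =>
    let len : Int := 1 + ((xs.takeWhile (· == x)).length : Int)
    let rest := runsOfSeq lane (xs.dropWhile (· == x))
    if x = lane then len :: rest else rest
termination_by l => l.length
decreasing_by
  simp only [List.length_cons]
  exact Nat.lt_succ_of_le (List.length_dropWhile_le _ _)

def compute_run_lengths_alt (sequences : List (List Int)) (lane : Int) : List Int :=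
  sequences.flatMap (runsOfSeq lane)

-- ===== PRECONDITION & SPEC =====
def Spec_compute_run_lengths (sequences : List (List Int)) (lane : Int) (out : List Int) : Prop := out = compute_run_lengths_alt sequences lane
instance (sequences : List (List Int)) (lane : Int) (out : List Int) : Decidable (Spec_compute_run_lengths sequences lane out) := by unfold Spec_compute_run_lengths; infer_instance

-- ===== CLAIM (what is proved, stated in full; the proofs are below) =====
def Claim_equal_compute_run_lengths : Prop := ∀ (sequences : List (List Int)) (lane : Int), Dom_compute_run_lengths sequences lane → Spec_compute_run_lengths sequences lane (compute_run_lengths sequences lane)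

-- ===== LEMMAS AND PROOFS =====

def stepA (lane : Int) (p : List Int × Int) (token : Int) : List Int × Int :=
  if token = lane then (p.1, p.2 + 1)
  else (if p.2 > 0 then p.1 ++ [p.2] else p.1, 0)

def flushA (p : List Int × Int) : List Int :=
  if p.2 > 0 then p.1 ++ [p.2] else p.1

-- A's fold over a block of tokens all equal to lane just counts them.
theorem foldl_all_lane (lane : Int) (t : List Int) (runs : List Int) (c : Int)
    (h : ∀ y ∈ t, y = lane) :
    t.foldl (stepA lane) (runs, c) = (runs, c + (t.length : Int)) := by
  induction t generalizing c with
  | nil => simp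
  | cons y ys ih =>
    have hy : y = lane := h y (by simp)
    simp only [List.foldl_cons, stepA, hy, if_true]
    rw [ih (c + 1) (fun z hz => h z (List.mem_cons_of_mem _ hz))]
    simp only [List.length_cons]
    congr 1
    push_cast
    ring

-- A's fold over a block of non-lane tokens from counter 0 does nothing.
theorem foldl_none_lane (lane : Int) (t : List Int) (runs : List Int)
    (h : ∀ y ∈ t, y ≠ lane) :
    t.foldl (stepA lane) (runs, (0 : Int)) = (runs, 0) := by
  induction t with
  | nil => simp
  | cons y ys ih =>
    have hy : y ≠ lane := h y (by simp)
    simp only [List.foldl_cons, stepA, if_neg hy]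
    simp only [show ¬((0:Int) > 0) by omega, if_false]
    exact ih (fun z hz => h z (by simp [hz]))

-- Per-sequence equivalence: A's counter loop, flushed, appends exactly B's run lengths.
theorem seq_lemma (lane : Int) (seq : List Int) (runs : List Int) :
    flushA (seq.foldl (stepA lane) (runs, 0)) = runs ++ runsOfSeq lane seq := by
  match seq with
  | [] => simp [flushA, runsOfSeq]
  | x :: xs =>
    have hsplit : xs = xs.takeWhile (· == x) ++ xs.dropWhile (· == x) :=
      (List.takeWhile_append_dropWhile).symm
    have htake : ∀ y ∈ xs.takeWhile (· == x), y = x := by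
      intro y hy
      have := List.mem_takeWhile_imp hy
      simpa using this
    have hdlen : (xs.dropWhile (· == x)).length ≤ xs.length := List.length_dropWhile_le _ _
    by_cases hx : x = lane
    · -- first token matches: counter becomes 1, then counts the whole run
      have h1 : (x :: xs).foldl (stepA lane) (runs, 0)
          = (xs.dropWhile (· == x)).foldl (stepA lane)
              (runs, 1 + ((xs.takeWhile (· == x)).length : Int)) := by
        conv_lhs => rw [show x :: xs = x :: (xs.takeWhile (· == x) ++ xs.dropWhile (· == x)) by rw [← hsplit]]
        simp only [List.foldl_cons, List.foldl_append, stepA, if_pos hx, zero_add]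
        rw [foldl_all_lane lane _ runs 1 (fun y hy => (htake y hy).trans hx)]
      set c : Int := 1 + ((xs.takeWhile (· == x)).length : Int) with hc
      have hcpos : c > 0 := by positivity
      have hB : runsOfSeq lane (x :: xs) = c :: runsOfSeq lane (xs.dropWhile (· == x)) := by
        rw [runsOfSeq]; simp [hx, hc]
      rw [h1, hB]
      match hd : xs.dropWhile (· == x) with
      | [] =>
        simp [flushA, if_pos hcpos, runsOfSeq]
      | y :: ys =>
        have hy : (y == x) = false := by
          have h2 := List.head_dropWhile_not (fun z : Int => z == x) (l := xs)
            (w := by rw [hd]; simp)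
          simpa [hd] using h2
        have hyl : y ≠ lane := by
          intro h; apply absurd hy; simp [h, hx]
        have hstep : stepA lane (runs, c) y = (runs ++ [c], 0) := by
          simp [stepA, hyl, if_pos hcpos]
        have hstep0 : stepA lane (runs ++ [c], 0) y = (runs ++ [c], 0) := by
          simp [stepA, hyl]
        calc flushA ((y :: ys).foldl (stepA lane) (runs, c))
            = flushA (ys.foldl (stepA lane) (runs ++ [c], 0)) := by
              simp only [List.foldl_cons, hstep]
          _ = flushA ((y :: ys).foldl (stepA lane) (runs ++ [c], 0)) := by
              simp only [List.foldl_cons, hstep0]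
          _ = (runs ++ [c]) ++ runsOfSeq lane (y :: ys) := by
              exact seq_lemma lane (y :: ys) (runs ++ [c])
          _ = runs ++ c :: runsOfSeq lane (y :: ys) := by simp
    · -- first token does not match: the whole run of x's is skipped
      have h1 : (x :: xs).foldl (stepA lane) (runs, 0)
          = (xs.dropWhile (· == x)).foldl (stepA lane) (runs, 0) := by
        conv_lhs => rw [show x :: xs = x :: (xs.takeWhile (· == x) ++ xs.dropWhile (· == x)) by rw [← hsplit]]
        simp only [List.foldl_cons, List.foldl_append, stepA, if_neg hx]
        simp only [show ¬((0:Int) > 0) by omega, if_false]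
        rw [foldl_none_lane lane _ runs (fun y hy => by rw [htake y hy]; exact hx)]
      have hB : runsOfSeq lane (x :: xs) = runsOfSeq lane (xs.dropWhile (· == x)) := by
        rw [runsOfSeq]; simp [hx]
      rw [h1, hB]
      exact seq_lemma lane (xs.dropWhile (· == x)) runs
termination_by seq.length
decreasing_by
  · have h3 := hdlen; rw [hd] at h3
    simp only [List.length_cons] at h3 ⊢; omega
  · simp only [List.length_cons]; omega

theorem outer_lemma (lane : Int) (seqs : List (List Int)) (acc : List Int) :
    seqs.foldl (fun runs seq => flushA (seq.foldl (stepA lane) (runs, 0))) acc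
      = acc ++ seqs.flatMap (runsOfSeq lane) := by
  induction seqs generalizing acc with
  | nil => simp
  | cons s ss ih =>
    simp only [List.foldl_cons, List.flatMap_cons]
    rw [ih, seq_lemma]
    simp

-- ===== VERDICT (by name: the statement is the Claim_ definition above) =====
theorem compute_run_lengths_spec : Claim_equal_compute_run_lengths := by
  intro sequences lane _
  show compute_run_lengths sequences lane = compute_run_lengths_alt sequences lane
  have hA : compute_run_lengths sequences lane
      = sequences.foldl (fun runs seq => flushA (seq.foldl (stepA lane) (runs, 0))) [] := rfl
  rw [hA, outer_lemma]
  rfl
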